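-- pv_equiv track=rewrite | github.com/ElenaAgapitova/GB_python_part2 | hw_3/task_4_2.py | find_all_combination
-- ===== SOURCE A (Python) =====
-- import itertools
--
-- def find_all_combination(things: dict, weight: int) -> list:
--     all_combination = []
--     for counter in range(1, len(things.items()) + 1):
--         for combination in itertools.combinations(things.items(), r=counter):
--             total_weight = sum(weight for _, weight in combination)
--             if (weight - min(things.values())) <= total_weight <= weight:
--                 all_combination.append((total_weight, [thing for thing, _ in combination]))
--     return all_combination
-- ===== SOURCE B (Python) =====
-- def find_all_combination(things: dict, weight: int) -> list:
--     items = list(things.items())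
--     if not items:
--         return []
--     low = weight - min(w for _, w in items)
--     out = []
--
--     def rec(rest, r, names, s):
--         if r == 0:
--             if low <= s <= weight:
--                 out.append((s, names))
--             return
--         if len(rest) < r:
--             return
--         name, w = rest[0]
--         tail = rest[1:]
--         rec(tail, r - 1, names + [name], s + w)
--         rec(tail, r, names, s)
--
--     for r in range(1, len(items) + 1):
--         rec(items, r, [], 0)
--     return out
-- ===== Notes on version B (the rewrite author's own statement) =====
-- stated objective: alternative
-- what changed: Replaces the itertools.combinations double loop that re-sums each candidate and recomputes min(things.values()) per candidate with a recursive include/exclude backtracker that computes the low threshold once and threads the running sum and name list through the recursion.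
import Mathlib
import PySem

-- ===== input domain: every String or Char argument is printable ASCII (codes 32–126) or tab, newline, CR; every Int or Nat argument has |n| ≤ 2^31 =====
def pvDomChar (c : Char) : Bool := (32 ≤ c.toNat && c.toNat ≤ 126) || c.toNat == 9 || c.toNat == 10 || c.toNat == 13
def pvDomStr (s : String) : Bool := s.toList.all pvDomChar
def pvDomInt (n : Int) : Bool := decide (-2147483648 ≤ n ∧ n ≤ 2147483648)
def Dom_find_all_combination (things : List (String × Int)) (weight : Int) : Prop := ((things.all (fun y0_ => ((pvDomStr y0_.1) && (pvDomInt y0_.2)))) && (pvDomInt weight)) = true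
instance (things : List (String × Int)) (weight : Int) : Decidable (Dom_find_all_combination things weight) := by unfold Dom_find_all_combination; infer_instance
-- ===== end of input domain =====

-- ===== PORT A =====
-- B re-implements A as a recursive include/exclude backtracker that computes the low threshold once and
-- threads the running sum and name list through the recursion (alternative algorithm, same outputs in the same order).
-- Port of A (itertools.combinations per size, re-summing and re-taking min per candidate).
-- min(things.values()) is only evaluated when the loops run, i.e. things ≠ [], so the .getD default is never used.
def find_all_combination (things : List (String × Int)) (weight : Int) : List (Int × List String) :=
  (PySem.List.pyRange 1 (things.length + 1) 1).foldl (fun acc counter =>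
    (PySem.List.combinations things counter.toNat).foldl (fun acc comb =>
      let total := (comb.map Prod.snd).sum
      let m := (PySem.List.min? (things.map Prod.snd) (fun x => x)).getD 0
      if weight - m ≤ total ∧ total ≤ weight then acc ++ [(total, comb.map Prod.fst)] else acc) acc) []

-- ===== PORT B =====
-- rec(rest, r, names, s): include-first / exclude-second backtracker from Source B, `out` threaded through.
def facRec (low weight : Int) : List (String × Int) → Nat → List String → Int → List (Int × List String) → List (Int × List String)
  | _, 0, names, s, out => if low ≤ s ∧ s ≤ weight then out ++ [(s, names)] else out
  | rest, r+1, names, s, out =>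
    if rest.length < r+1 then out
    else
      match rest with
      | [] => out
      | (name, w) :: tail =>
        facRec low weight tail (r+1) names s (facRec low weight tail r (names ++ [name]) (s + w) out)

def find_all_combination_alt (things : List (String × Int)) (weight : Int) : List (Int × List String) :=
  match PySem.List.min? (things.map Prod.snd) (fun x => x) with
  | none => []
  | some m =>
    let low := weight - m
    (PySem.List.pyRange 1 (things.length + 1) 1).foldl (fun out r => facRec low weight things r.toNat [] 0 out) []

-- ===== PRECONDITION & SPEC =====
def Spec_find_all_combination (things : List (String × Int)) (weight : Int) (out : List (Int × List String)) : Prop := out = find_all_combination_alt things weight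
instance (things : List (String × Int)) (weight : Int) (out : List (Int × List String)) : Decidable (Spec_find_all_combination things weight out) := by unfold Spec_find_all_combination; infer_instance

-- ===== CLAIM (what is proved, stated in full; the proofs are below) =====
def Claim_equal_find_all_combination : Prop := ∀ (things : List (String × Int)) (weight : Int), Dom_find_all_combination things weight → Spec_find_all_combination things weight (find_all_combination things weight)

-- ===== LEMMAS AND PROOFS =====

-- what one complete subset c contributes, given partial sum s and partial name list names
def pvEmit (low weight s : Int) (names : List String) (c : List (String × Int)) : List (Int × List String) :=
  let t := s + (c.map Prod.snd).sum
  if low ≤ t ∧ t ≤ weight then [(t, names ++ c.map Prod.fst)] else []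

theorem pvEmit_cons (low weight s : Int) (names : List String) (x : String × Int) (c : List (String × Int)) :
    pvEmit low weight s names (x :: c) = pvEmit low weight (s + x.2) (names ++ [x.1]) c := by
  simp [pvEmit, add_assoc]

theorem facRec_eq (low weight : Int) : ∀ (rest : List (String × Int)) (r : Nat) (names : List String)
    (s : Int) (out : List (Int × List String)),
    facRec low weight rest r names s out
      = out ++ (PySem.List.combinations rest r).flatMap (pvEmit low weight s names) := by
  intro rest
  induction rest with
  | nil =>
    intro r names s out
    cases r with
    | zero =>
      simp only [facRec, pvEmit, PySem.List.combinations_zero, List.flatMap_cons,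
        List.flatMap_nil, List.append_nil, List.map_nil, List.sum_nil, add_zero]
      split_ifs <;> simp
    | succ r => simp [facRec, PySem.List.combinations_nil_succ]
  | cons x tail ih =>
    intro r names s out
    cases r with
    | zero =>
      simp only [facRec, pvEmit, PySem.List.combinations_zero, List.flatMap_cons,
        List.flatMap_nil, List.append_nil, List.map_nil, List.sum_nil, add_zero]
      split_ifs <;> simp
    | succ r =>
      by_cases hlen : (x :: tail).length < r + 1
      · rw [PySem.List.combinations_eq_nil_of_length_lt _ hlen]
        simp only [facRec, if_pos hlen, List.flatMap_nil, List.append_nil]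
      · obtain ⟨name, w⟩ := x
        simp only [facRec, if_neg hlen, ih, PySem.List.combinations_cons_succ,
          List.flatMap_append, List.flatMap_map, List.append_assoc]
        simp [pvEmit_cons]

theorem pvFoldlExt {α β : Type} (f g : β → α → β) (h : ∀ a b, f a b = g a b) :
    ∀ (l : List α) (i : β), l.foldl f i = l.foldl g i := by
  intro l
  induction l with
  | nil => intro i; rfl
  | cons x t ih => intro i; simp only [List.foldl_cons, h, ih]

-- A's inner loop, written with low = weight - min, collected as a flatMap of pvEmit
theorem aFold_eq (low weight : Int) : ∀ (l : List (List (String × Int))) (acc : List (Int × List String)),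
    l.foldl (fun acc c =>
        if low ≤ (c.map Prod.snd).sum ∧ (c.map Prod.snd).sum ≤ weight then
          acc ++ [((c.map Prod.snd).sum, c.map Prod.fst)] else acc) acc
      = acc ++ l.flatMap (pvEmit low weight 0 []) := by
  intro l
  induction l with
  | nil => simp
  | cons c t ih =>
    intro acc
    simp only [List.foldl_cons, List.flatMap_cons, ih]
    by_cases h : low ≤ (c.map Prod.snd).sum ∧ (c.map Prod.snd).sum ≤ weight <;>
      simp [pvEmit, h, List.append_assoc]

-- ===== VERDICT (by name: the statement is the Claim_ definition above) =====
theorem find_all_combination_spec : Claim_equal_find_all_combination := by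
  intro things weight _
  unfold Spec_find_all_combination
  cases things with
  | nil =>
    have h : PySem.List.pyRange 1 ((1:Int)) 1 = [] := by decide
    simp [find_all_combination, find_all_combination_alt, h, PySem.List.min?]
  | cons x t =>
    have hmin : PySem.List.min? ((x :: t).map Prod.snd) (fun y => y)
        = some ((t.map Prod.snd).foldl min x.2) := by
      simp [PySem.List.min?_id_cons]
    simp only [find_all_combination, find_all_combination_alt, hmin]
    apply pvFoldlExt
    intro acc counter
    simp only [Option.getD_some]
    rw [facRec_eq]
    exact aFold_eq _ _ _ _
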